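-- pv_equiv track=rewrite | github.com/Tomsalus/python-files | p5_alchemy.py | is_creatable
-- ===== SOURCE A (Python) =====
-- from typing import Set, Dict
--
-- def is_creatable(owned_substances: Set[str],
--                  rules: Dict[str, Set[str]], wanted: str) -> bool:
--     needed_substances = rules.get(wanted, "")
--
--     if rules == {} and wanted not in owned_substances:
--         return False
--
--     for substance in rules:
--         needed_substances = rules.get(substance, "")
--         for material in needed_substances:
--             if (material not in rules and material not in owned_substances):
--                 return False
--
--     return True
-- ===== SOURCE B (Python) =====
-- def is_creatable(owned_substances, rules, wanted):
--     if not rules and wanted not in owned_substances: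
--         return False
--     known = sorted(set(rules) | set(owned_substances))
--     needed = sorted({m for mats in rules.values() for m in mats})
--     i = 0
--     for m in needed:
--         while i < len(known) and known[i] < m:
--             i += 1
--         if i == len(known) or known[i] != m:
--             return False
--     return True
-- ===== Notes on version B (the rewrite author's own statement) =====
-- stated objective: alternative
-- what changed: Replaced the nested short-circuit membership loops by a sort-then-merge algorithm: build sorted deduplicated lists of known names (rule keys plus owned) and of all needed materials, then verify containment with a single two-pointer merge scan instead of per-element membership tests. Pre_ only excludes association lists with duplicate keys, which represent no Python dict (dict keys are unique) and so are not runnable Python inputs.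
import Mathlib
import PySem

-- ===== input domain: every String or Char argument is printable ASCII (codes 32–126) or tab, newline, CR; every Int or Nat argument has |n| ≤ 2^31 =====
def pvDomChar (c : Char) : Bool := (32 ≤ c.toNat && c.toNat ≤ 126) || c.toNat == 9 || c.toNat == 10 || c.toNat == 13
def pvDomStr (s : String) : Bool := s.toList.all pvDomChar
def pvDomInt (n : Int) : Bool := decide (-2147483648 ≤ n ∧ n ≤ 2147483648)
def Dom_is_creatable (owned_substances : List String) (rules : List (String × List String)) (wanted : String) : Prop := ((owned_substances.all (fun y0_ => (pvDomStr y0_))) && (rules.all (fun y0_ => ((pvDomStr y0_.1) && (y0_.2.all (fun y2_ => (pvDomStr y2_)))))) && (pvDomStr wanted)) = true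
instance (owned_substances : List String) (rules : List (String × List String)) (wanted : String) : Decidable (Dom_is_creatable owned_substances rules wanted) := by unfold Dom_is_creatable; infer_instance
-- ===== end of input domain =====

-- B replaces A's nested membership-testing loops by a sort-then-merge algorithm (sorted deduped
-- known/needed lists checked by one two-pointer scan): an alternative algorithm, no speed claim.
-- Equivalence of the RETURN value on Pre_.

-- ===== PORT A =====
-- the outer 'for substance in rules' loop with its early 'return False';
-- 'rules.get(substance, "")' is Dict.getD with default [] (iterating "" yields nothing, like []);
-- 'material not in rules' is key membership
def isCreatableLoop (owned_substances : List String) (rules : List (String × List String)) : List (String × List String) → Bool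
  | [] => true
  | (substance, _) :: rest =>
      let needed_substances := (PySem.Dict.mk rules).getD substance []
      if needed_substances.any (fun material =>
          !((PySem.Dict.mk rules).contains material) && !(owned_substances.contains material)) then
        false
      else
        isCreatableLoop owned_substances rules rest

def is_creatable (owned_substances : List String) (rules : List (String × List String)) (wanted : String) : Bool :=
  -- 'needed_substances = rules.get(wanted, "")' is dead: reassigned before any use
  if rules.isEmpty && !(owned_substances.contains wanted) then false
  else isCreatableLoop owned_substances rules rules

-- ===== PORT B =====
-- the 'for m in needed' loop with its inner 'while known[i] < m: i += 1' pointer advance: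
-- recursion consumes the sorted known list in place of the index i
def mergeScan : List String → List String → Bool
  | [], _ => true
  | _ :: _, [] => false
  | m :: ms, k :: ks =>
      if k < m then mergeScan (m :: ms) ks
      else if k == m then mergeScan ms (k :: ks)
      else false
  termination_by needed known => (needed.length, known.length)

def is_creatable_alt (owned_substances : List String) (rules : List (String × List String)) (wanted : String) : Bool :=
  if rules.isEmpty && !(owned_substances.contains wanted) then false
  else
    -- known = sorted(set(rules) | set(owned_substances)); needed = sorted({m for mats in rules.values() for m in mats})
    let known := PySem.List.sorted (PySem.Set.ofList (rules.map Prod.fst ++ owned_substances)) (fun x => x) false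
    let needed := PySem.List.sorted (PySem.Set.ofList (rules.map Prod.snd).flatten) (fun x => x) false
    mergeScan needed known

-- ===== PRECONDITION & SPEC =====
-- Pre_ only excludes association lists with duplicate keys: such lists represent no Python dict
-- (Python dict keys are unique), so neither Python program can be run on them.
def Pre_is_creatable (owned_substances : List String) (rules : List (String × List String)) (wanted : String) : Prop :=
  (rules.map Prod.fst).Nodup
instance (owned_substances : List String) (rules : List (String × List String)) (wanted : String) : Decidable (Pre_is_creatable owned_substances rules wanted) := by unfold Pre_is_creatable; infer_instance
def pvWitness_is_creatable : List String × (List (String × List String)) × String :=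
  (["fire"], [("mud", ["fire", "water"]), ("water", [])], "mud")
def Spec_is_creatable (owned_substances : List String) (rules : List (String × List String)) (wanted : String) (out : Bool) : Prop := out = is_creatable_alt owned_substances rules wanted
instance (owned_substances : List String) (rules : List (String × List String)) (wanted : String) (out : Bool) : Decidable (Spec_is_creatable owned_substances rules wanted out) := by unfold Spec_is_creatable; infer_instance

-- ===== CLAIM (what is proved, stated in full; the proofs are below) =====
def Claim_equal_is_creatable : Prop := ∀ (owned_substances : List String) (rules : List (String × List String)) (wanted : String), Dom_is_creatable owned_substances rules wanted → Pre_is_creatable owned_substances rules wanted → Spec_is_creatable owned_substances rules wanted (is_creatable owned_substances rules wanted)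

-- ===== LEMMAS AND PROOFS =====

-- Dict key membership is membership in the key list
theorem dict_contains_eq {rules : List (String × List String)} (m : String) :
    (PySem.Dict.mk rules).contains m = (rules.map Prod.fst).contains m := by
  rw [Bool.eq_iff_iff]
  simp only [PySem.Dict.contains, List.any_eq_true, List.contains_eq_mem,
    decide_eq_true_eq, List.mem_map, beq_iff_eq]

-- under Nodup keys, getD on an entry's key returns that entry's own value
theorem getD_of_mem {rules : List (String × List String)}
    (hnd : (rules.map Prod.fst).Nodup) {p : String × List String} (hp : p ∈ rules) :
    (PySem.Dict.mk rules).getD p.1 [] = p.2 := by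
  induction rules with
  | nil => cases hp
  | cons q rest ih =>
      obtain ⟨k, v⟩ := q
      simp only [List.map_cons, List.nodup_cons] at hnd
      rcases List.mem_cons.mp hp with h | h
      · subst h
        simp [PySem.Dict.getD, PySem.Dict.get?_mk_cons]
      · have hne : k ≠ p.1 := fun he => hnd.1 (he ▸ List.mem_map_of_mem h)
        have := ih hnd.2 h
        simpa [PySem.Dict.getD, PySem.Dict.get?_mk_cons, hne] using this

-- A's outer loop is an 'all' over the entries, each read with its own value
theorem loop_eq_all (owned : List String) (rules l : List (String × List String))
    (hnd : (rules.map Prod.fst).Nodup) (hl : ∀ p ∈ l, p ∈ rules) :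
    isCreatableLoop owned rules l =
      l.all (fun p => p.2.all (fun m =>
        (rules.map Prod.fst).contains m || owned.contains m)) := by
  induction l with
  | nil => rfl
  | cons p rest ih =>
      have hp : p ∈ rules := hl p (List.mem_cons_self ..)
      have hrest : ∀ q ∈ rest, q ∈ rules := fun q hq => hl q (List.mem_cons_of_mem _ hq)
      simp only [isCreatableLoop, getD_of_mem hnd hp, List.all_cons, ih hrest]
      cases hb : p.2.any (fun material =>
          !((PySem.Dict.mk rules).contains material) && !(owned.contains material)) with
      | false =>
          simp only [Bool.false_eq_true, if_false]
          have : p.2.all (fun m =>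
              (rules.map Prod.fst).contains m || owned.contains m) = true := by
            simp only [List.any_eq_false] at hb
            simp only [List.all_eq_true]
            intro m hm
            have := hb m hm
            rw [dict_contains_eq] at this
            revert this
            cases (rules.map Prod.fst).contains m <;> cases owned.contains m <;> simp
          rw [this, Bool.true_and]
      | true =>
          simp only [if_true]
          have : p.2.all (fun m =>
              (rules.map Prod.fst).contains m || owned.contains m) = false := by
            simp only [List.any_eq_true] at hb
            obtain ⟨m, hm, hbad⟩ := hb
            rw [dict_contains_eq] at hbad
            simp only [List.all_eq_false]
            refine ⟨m, hm, ?_⟩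
            revert hbad
            cases (rules.map Prod.fst).contains m <;> cases owned.contains m <;> simp
          rw [this, Bool.false_and]

-- on weakly sorted inputs, B's merge scan decides element-wise containment
theorem mergeScan_eq_all (needed known : List String)
    (hn : needed.Pairwise (· ≤ ·)) (hk : known.Pairwise (· ≤ ·)) :
    mergeScan needed known = needed.all (fun m => known.contains m) := by
  fun_induction mergeScan needed known with
  | case1 known => rfl
  | case2 m ms => simp
  | case3 m ms k ks hlt ih =>
      rw [ih hn (List.Pairwise.of_cons hk)]
      have hnotk : ∀ x ∈ m :: ms, x ≠ k := by
        intro x hx hxk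
        rcases List.mem_cons.mp hx with rfl | hx
        · rw [hxk] at hlt; exact lt_irrefl _ hlt
        · have hmx : m ≤ x := (List.pairwise_cons.mp hn).1 x hx
          rw [hxk] at hmx
          exact lt_irrefl k (lt_of_lt_of_le hlt hmx)
      rw [Bool.eq_iff_iff]
      simp only [List.all_eq_true, List.contains_eq_mem, decide_eq_true_eq]
      constructor
      · intro h x hx
        exact List.mem_cons_of_mem _ (h x hx)
      · intro h x hx
        rcases List.mem_cons.mp (h x hx) with he | hm
        · exact absurd he (hnotk x hx)
        · exact hm
  | case4 m ms k ks hlt heq ih =>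
      have hkm : k = m := by simpa using heq
      rw [ih (List.Pairwise.of_cons hn) hk]
      rw [Bool.eq_iff_iff]
      simp only [List.all_cons, List.all_eq_true, Bool.and_eq_true, List.contains_eq_mem,
        decide_eq_true_eq]
      constructor
      · intro h
        exact ⟨hkm ▸ List.mem_cons_self .., h⟩
      · exact fun h => h.2
  | case5 m ms k ks hlt heq =>
      have hmk : m < k := by
        rcases lt_trichotomy k m with h | h | h
        · exact absurd h hlt
        · exact absurd h (by simpa using heq)
        · exact h
      have hmem : ((k :: ks).contains m) = false := by
        simp only [List.contains_eq_mem, decide_eq_false_iff_not]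
        intro hmem
        rcases List.mem_cons.mp hmem with rfl | hmem
        · exact lt_irrefl m hmk
        · exact lt_irrefl m (lt_of_lt_of_le hmk ((List.pairwise_cons.mp hk).1 m hmem))
      rw [eq_comm, List.all_cons, hmem, Bool.false_and]

-- ===== VERDICT (by name: the statement is the Claim_ definition above) =====
theorem is_creatable_spec : Claim_equal_is_creatable := by
  intro owned rules wanted _ hpre
  unfold Spec_is_creatable is_creatable is_creatable_alt
  cases hg : rules.isEmpty && !(owned.contains wanted) with
  | true => simp only [if_true]
  | false =>
    simp only [Bool.false_eq_true, if_false]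
    rw [loop_eq_all owned rules rules hpre (fun p hp => hp)]
    rw [mergeScan_eq_all _ _
      (PySem.List.sorted_pairwise _ _)
      (PySem.List.sorted_pairwise _ _)]
    rw [Bool.eq_iff_iff]
    simp only [List.all_eq_true, List.contains_eq_mem, decide_eq_true_eq,
      PySem.List.mem_sorted, PySem.Set.mem_ofList, List.mem_append, List.mem_flatten,
      List.mem_map, Bool.or_eq_true]
    constructor
    · intro h m hm
      obtain ⟨v, ⟨p, hp, rfl⟩, hmv⟩ := hm
      have := h p hp m hmv
      rcases this with h1 | h1
      · exact .inl (by simpa using h1)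
      · exact .inr (by simpa using h1)
    · intro h p hp m hm
      have := h m ⟨p.2, ⟨p, hp, rfl⟩, hm⟩
      rcases this with h1 | h1
      · exact .inl (by simpa using h1)
      · exact .inr (by simpa using h1)
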